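-- pv_equiv track=rewrite | github.com/adijays17/HackerRankCoding | Price.py | calculateAmount
-- ===== SOURCE A (Python) =====
-- def calculateAmount(prices):
--     total = 0
--     minimum = 0
--     for i in range(0, len(prices)):
--         if i == 0:
--             total += prices[i]
--             minimum = prices[i]
--         else:
--             total +=  max(prices[i]-minimum, 0)
--             if prices[i] < minimum:
--                 minimum = prices[i]
--     return total
-- ===== SOURCE B (Python) =====
-- def calculateAmount(prices):
--     if not prices:
--         return 0
--     # pass 1: prefix minimums; mins[i] = min(prices[:i+1])
--     mins = [prices[0]]
--     for p in prices[1:]: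
--         mins.append(p if p < mins[-1] else mins[-1])
--     # pass 2: each later price gains against the minimum over strictly earlier prices
--     return prices[0] + sum(max(p - m, 0) for p, m in zip(prices[1:], mins))
-- ===== Notes on version B (the rewrite author's own statement) =====
-- stated objective: alternative
-- what changed: Replaces the single interleaved index loop (running min updated while accumulating) by two separately shaped passes: first build the prefix-minimum table, then sum the gains of each price over the minimum of strictly earlier prices via zip.
import Mathlib
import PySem

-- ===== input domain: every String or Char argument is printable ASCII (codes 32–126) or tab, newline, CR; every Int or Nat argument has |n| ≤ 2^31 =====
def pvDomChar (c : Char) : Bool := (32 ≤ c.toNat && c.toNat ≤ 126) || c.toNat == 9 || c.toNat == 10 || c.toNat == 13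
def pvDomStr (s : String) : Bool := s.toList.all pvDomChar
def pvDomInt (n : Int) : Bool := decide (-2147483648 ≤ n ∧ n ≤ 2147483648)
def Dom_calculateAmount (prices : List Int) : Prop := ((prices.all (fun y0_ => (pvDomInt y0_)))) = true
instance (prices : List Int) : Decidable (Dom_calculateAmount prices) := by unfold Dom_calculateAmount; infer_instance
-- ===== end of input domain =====

-- B changes the decomposition: a prefix-minimum table built first, then a separate gain-summing pass (alternative, same cost).

-- ===== PORT A =====
-- A's single loop over range(0, len(prices)) carrying (total, minimum); indices are always in
-- range, so pyGetD's default 0 is never used. pvBodyA is the loop body, verbatim.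
def pvBodyA (prices : List Int) (st : Int × Int) (i : Int) : Int × Int :=
  let p := PySem.List.pyGetD prices i 0
  if i = 0 then (st.1 + p, p)
  else (st.1 + max (p - st.2) 0, if p < st.2 then p else st.2)

def calculateAmount (prices : List Int) : Int :=
  ((PySem.List.pyRange 0 (prices.length : Int) 1).foldl (pvBodyA prices) (0, 0)).1

-- ===== PORT B =====
-- Source B pass 1: the `for p in prices[1:]: mins.append(...)` loop, written as structural
-- recursion carrying the current minimum (mins[-1]).
def pvBuildMins (m : Int) : List Int → List Int
  | [] => []
  | p :: ps => let m' := if p < m then p else m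
               m' :: pvBuildMins m' ps

def calculateAmount_alt (prices : List Int) : Int :=
  match prices with
  | [] => 0
  | p0 :: rest =>
      let mins := p0 :: pvBuildMins p0 rest
      p0 + (rest.zip mins).foldl (fun acc pm => acc + max (pm.1 - pm.2) 0) 0

-- ===== PRECONDITION & SPEC =====
def Spec_calculateAmount (prices : List Int) (out : Int) : Prop := out = calculateAmount_alt prices
instance (prices : List Int) (out : Int) : Decidable (Spec_calculateAmount prices out) := by unfold Spec_calculateAmount; infer_instance

-- ===== CLAIM (what is proved, stated in full; the proofs are below) =====
def Claim_equal_calculateAmount : Prop := ∀ (prices : List Int), Dom_calculateAmount prices → Spec_calculateAmount prices (calculateAmount prices)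

-- ===== LEMMAS AND PROOFS =====

-- A's loop body with the i = 0 branch removed, acting on the fetched element.
def pvStep (st : Int × Int) (p : Int) : Int × Int :=
  (st.1 + max (p - st.2) 0, if p < st.2 then p else st.2)

-- Core invariant: the interleaved fold equals "init total + gains against prefix minimums".
theorem pvCore (rest : List Int) : ∀ (t m : Int),
    (rest.foldl pvStep (t, m)).1
      = t + (rest.zip (m :: pvBuildMins m rest)).foldl
              (fun acc pm => acc + max (pm.1 - pm.2) 0) 0 := by
  induction rest with
  | nil => intro t m; simp
  | cons p ps ih =>
    intro t m
    simp only [List.foldl_cons, pvStep, pvBuildMins, List.zip_cons_cons]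
    rw [ih]
    rw [PySem.List.foldl_add (ps.zip _) (fun pm => max (pm.1 - pm.2) 0),
        PySem.List.foldl_add (ps.zip _) (fun pm => max (pm.1 - pm.2) 0)]
    ring

theorem calcAmount_eq : ∀ (prices : List Int), calculateAmount prices = calculateAmount_alt prices := by
  intro prices
  cases prices with
  | nil => rfl
  | cons p0 rest =>
    unfold calculateAmount calculateAmount_alt
    rw [PySem.List.pyRange_one_cons (by simp), List.foldl_cons]
    have h0 : pvBodyA (p0 :: rest) (0, 0) 0 = (0 + p0, p0) := by
      simp [pvBodyA, PySem.List.pyGetD_ofNat']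
    rw [h0,
        PySem.List.foldl_congr_mem' _ _ (fun st i => pvStep st (PySem.List.pyGetD (p0 :: rest) i 0)) _
          (fun x hx acc => by
            have hx1 : (1 : Int) ≤ x := (PySem.List.mem_pyRange_one.mp hx).1
            simp [pvBodyA, pvStep, show x ≠ 0 by omega]),
        PySem.List.foldl_pyRange_pyGetD' (p0 :: rest) 0 pvStep (0 + p0, p0) (by norm_num)]
    rw [pvCore]
    norm_num

-- ===== VERDICT (by name: the statement is the Claim_ definition above) =====
theorem calculateAmount_spec : Claim_equal_calculateAmount := by
  intro prices _
  unfold Spec_calculateAmount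
  exact calcAmount_eq prices
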